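-- pv_equiv track=rewrite | github.com/Junliang-Zhou/CS526 | homework5 Q3.py | longest_alternating_increasing
-- ===== SOURCE A (Python) =====
-- def longest_alternating_increasing(A, B):
--     def build(A, B):
--         n, m = len(A), len(B)
--         dpA = [[] for _ in range(n)]
--         dpB = [[] for _ in range(m)]
--
--         for i in range(n):
--             dpA[i] = [A[i]]
--             for j in range(i):
--                 if A[j] < A[i] and len(dpA[j]) + 1 > len(dpA[i]):
--                     dpA[i] = dpA[j] + [A[i]]
--
--         for i in range(m):
--             dpB[i] = [B[i]]
--             for j in range(i):
--                 if B[j] < B[i] and len(dpB[j]) + 1 > len(dpB[i]):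
--                     dpB[i] = dpB[j] + [B[i]]
--
--         best = []
--
--         for i in range(n):
--             for j in range(m):
--                 if A[i] < B[j]:
--                     seq = [A[i]] + dpB[j]
--                     if len(seq) > len(best):
--                         best = seq
--                 if B[j] < A[i]:
--                     seq = [B[j]] + dpA[i]
--                     if len(seq) > len(best):
--                         best = seq
--         return best
--
--     return max(build(A, B), build(B, A), key=len)
-- ===== SOURCE B (Python) =====
-- def longest_alternating_increasing(A, B):
--     def lenpar(X):
--         # ln[i] = length of A's dp chain ending at i; par[i] = predecessor index or -1
--         n = len(X)
--         ln = [1] * n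
--         par = [-1] * n
--         for i in range(n):
--             for j in range(i):
--                 if X[j] < X[i] and ln[j] + 1 > ln[i]:
--                     ln[i] = ln[j] + 1
--                     par[i] = j
--         return ln, par
--
--     def chain(X, par, k):
--         out = []
--         while k >= 0:
--             out.append(X[k])
--             k = par[k]
--         out.reverse()
--         return out
--
--     def build(X, Y):
--         lnX, parX = lenpar(X)
--         lnY, parY = lenpar(Y)
--         best_len = 0
--         best = None
--         for i in range(len(X)):
--             for j in range(len(Y)):
--                 if X[i] < Y[j] and 1 + lnY[j] > best_len:
--                     best_len = 1 + lnY[j]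
--                     best = (True, i, j)
--                 if Y[j] < X[i] and 1 + lnX[i] > best_len:
--                     best_len = 1 + lnX[i]
--                     best = (False, i, j)
--         if best is None:
--             return []
--         side, i, j = best
--         if side:
--             return [X[i]] + chain(Y, parY, j)
--         else:
--             return [Y[j]] + chain(X, parX, i)
--
--     r1 = build(A, B)
--     r2 = build(B, A)
--     return r1 if len(r1) >= len(r2) else r2
-- ===== Notes on version B (the rewrite author's own statement) =====
-- stated objective: faster
-- what changed: Replaces the list-valued dp (which copies O(n)-long lists at every improvement) with integer length/parent arrays filled by the same nested loops, tracks the best combined answer by length and endpoints only, and materialises the single winning subsequence once by backtracking through the parents.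
import Mathlib
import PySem

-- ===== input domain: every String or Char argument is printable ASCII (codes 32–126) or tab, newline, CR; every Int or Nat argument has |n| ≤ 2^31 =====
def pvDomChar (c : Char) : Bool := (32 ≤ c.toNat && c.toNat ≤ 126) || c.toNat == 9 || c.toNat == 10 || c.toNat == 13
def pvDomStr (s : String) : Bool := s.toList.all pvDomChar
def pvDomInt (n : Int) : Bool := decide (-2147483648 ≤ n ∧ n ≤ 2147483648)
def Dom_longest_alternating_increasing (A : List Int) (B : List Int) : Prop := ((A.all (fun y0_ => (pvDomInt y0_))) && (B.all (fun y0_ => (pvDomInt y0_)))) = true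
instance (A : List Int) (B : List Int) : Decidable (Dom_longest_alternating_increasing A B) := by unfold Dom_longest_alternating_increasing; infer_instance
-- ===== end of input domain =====

-- B replaces A's list-valued dp (O(n^2) list copies) by integer length/parent arrays with a
-- single backtrack at the end; same scan order and strict tie-breaks, so the results agree.

-- ===== PORT A =====
-- inner loop of A's dp: dpX[i] starts as [X[i]], improved by earlier entries
def pvDpRow (X : List Int) (dp : List (List Int)) (i : Nat) : List Int :=
  (List.range i).foldl (fun cur j =>
    if X.getD j 0 < X.getD i 0 ∧ (dp.getD j []).length + 1 > cur.length
    then dp.getD j [] ++ [X.getD i 0] else cur) [X.getD i 0]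

-- A's dp array after processing indices 0..n-1
def pvDpN (X : List Int) (n : Nat) : List (List Int) :=
  (List.range n).foldl (fun dp i => dp ++ [pvDpRow X dp i]) []

-- A's build(A, B)
def pvBuildA (X Y : List Int) : List Int :=
  let dpX := pvDpN X X.length
  let dpY := pvDpN Y Y.length
  (List.range X.length).foldl (fun best i =>
    (List.range Y.length).foldl (fun best j =>
      let b1 := if X.getD i 0 < Y.getD j 0 ∧ (X.getD i 0 :: dpY.getD j []).length > best.length
                then X.getD i 0 :: dpY.getD j [] else best
      if Y.getD j 0 < X.getD i 0 ∧ (Y.getD j 0 :: dpX.getD i []).length > b1.length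
      then Y.getD j 0 :: dpX.getD i [] else b1) best) []

def longest_alternating_increasing (A : List Int) (B : List Int) : List Int :=
  let r1 := pvBuildA A B
  let r2 := pvBuildA B A
  if r2.length > r1.length then r2 else r1   -- max(r1, r2, key=len) returns r1 on ties

-- ===== PORT B =====
-- inner loop of B's lenpar: (length, parent) for index i; parent -1 = none
def pvLpRow (X : List Int) (lp : List (Nat × Int)) (i : Nat) : Nat × Int :=
  (List.range i).foldl (fun cur j =>
    if X.getD j 0 < X.getD i 0 ∧ (lp.getD j (1, -1)).1 + 1 > cur.1
    then ((lp.getD j (1, -1)).1 + 1, (j : Int)) else cur) (1, -1)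

-- B's (ln, par) arrays after processing indices 0..n-1
def pvLpN (X : List Int) (n : Nat) : List (Nat × Int) :=
  (List.range n).foldl (fun lp i => lp ++ [pvLpRow X lp i]) []

-- B's chain backtrack (while k >= 0, collecting front-to-back); parents strictly decrease,
-- so fuel = X.length makes the fuel recursion exact for the Python while-loop
def pvChain (X : List Int) (lp : List (Nat × Int)) : Nat → Int → List Int → List Int
  | 0, _, acc => acc
  | f+1, k, acc =>
      if 0 ≤ k then pvChain X lp f (lp.getD k.toNat (1, -1)).2 (X.getD k.toNat 0 :: acc)
      else acc

-- B's build(X, Y): best kept as (best_len, endpoints), materialised once at the end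
def pvBuildB (X Y : List Int) : List Int :=
  let lpX := pvLpN X X.length
  let lpY := pvLpN Y Y.length
  let best := (List.range X.length).foldl (fun best i =>
    (List.range Y.length).foldl (fun (best : Nat × Option (Bool × Nat × Nat)) j =>
      let b1 := if X.getD i 0 < Y.getD j 0 ∧ 1 + (lpY.getD j (1, -1)).1 > best.1
                then (1 + (lpY.getD j (1, -1)).1, some (true, i, j)) else best
      if Y.getD j 0 < X.getD i 0 ∧ 1 + (lpX.getD i (1, -1)).1 > b1.1
      then (1 + (lpX.getD i (1, -1)).1, some (false, i, j)) else b1) best) (0, none)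
  match best.2 with
  | none => []
  | some (s, i, j) =>
      if s then X.getD i 0 :: pvChain Y lpY Y.length (j : Int) []
      else Y.getD j 0 :: pvChain X lpX X.length (i : Int) []

def longest_alternating_increasing_alt (A : List Int) (B : List Int) : List Int :=
  let r1 := pvBuildB A B
  let r2 := pvBuildB B A
  if r1.length ≥ r2.length then r1 else r2

-- ===== PRECONDITION & SPEC =====
def Spec_longest_alternating_increasing (A : List Int) (B : List Int) (out : List Int) : Prop := out = longest_alternating_increasing_alt A B
instance (A : List Int) (B : List Int) (out : List Int) : Decidable (Spec_longest_alternating_increasing A B out) := by unfold Spec_longest_alternating_increasing; infer_instance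

-- ===== CLAIM (what is proved, stated in full; the proofs are below) =====
def Claim_equal_longest_alternating_increasing : Prop := ∀ (A : List Int) (B : List Int), Dom_longest_alternating_increasing A B → Spec_longest_alternating_increasing A B (longest_alternating_increasing A B)

-- ===== LEMMAS AND PROOFS =====

theorem pvDpN_len (X : List Int) (n : Nat) : (pvDpN X n).length = n := by
  induction n with
  | zero => rfl
  | succ n ih => simp [pvDpN, List.range_succ, List.foldl_append] at *; omega

theorem pvLpN_len (X : List Int) (n : Nat) : (pvLpN X n).length = n := by
  induction n with
  | zero => rfl
  | succ n ih => simp [pvLpN, List.range_succ, List.foldl_append] at *; omega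

theorem pvDpN_succ (X : List Int) (n : Nat) :
    pvDpN X (n+1) = pvDpN X n ++ [pvDpRow X (pvDpN X n) n] := by
  simp [pvDpN, List.range_succ]

theorem pvLpN_succ (X : List Int) (n : Nat) :
    pvLpN X (n+1) = pvLpN X n ++ [pvLpRow X (pvLpN X n) n] := by
  simp [pvLpN, List.range_succ]

theorem pvChain_neg (X : List Int) (lp : List (Nat × Int)) (f : Nat) (k : Int) (acc : List Int)
    (hk : k < 0) : pvChain X lp f k acc = acc := by
  cases f with
  | zero => rfl
  | succ f => simp [pvChain]; omega

theorem pvChain_acc (X : List Int) (lp : List (Nat × Int)) :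
    ∀ (f : Nat) (k : Int) (acc : List Int),
      pvChain X lp f k acc = pvChain X lp f k [] ++ acc := by
  intro f
  induction f with
  | zero => intro k acc; rfl
  | succ f ih =>
    intro k acc
    by_cases hk : 0 ≤ k
    · simp only [pvChain, if_pos hk]
      rw [ih _ (X.getD k.toNat 0 :: acc), ih _ [X.getD k.toNat 0]]
      simp
    · simp only [pvChain, if_neg hk]; simp

-- invariant on the parent array: every parent is below its index
def pvParInv (lp : List (Nat × Int)) : Prop :=
  ∀ idx, idx < lp.length → (lp.getD idx (1, -1)).2 < (idx : Int)

theorem pvChain_fuel (X : List Int) (lp : List (Nat × Int)) (hinv : pvParInv lp) :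
    ∀ (k : Nat), k < lp.length → ∀ (f : Nat) (acc : List Int), k + 1 ≤ f →
      pvChain X lp f (k : Int) acc = pvChain X lp (k+1) (k : Int) acc := by
  intro k
  induction k using Nat.strong_induction_on with
  | _ k ih =>
    intro hk f acc hf
    obtain ⟨f, rfl⟩ : ∃ f', f = f' + 1 := ⟨f - 1, by omega⟩
    have h0 : (0 : Int) ≤ (k : Int) := by positivity
    simp only [pvChain, if_pos h0, Int.toNat_natCast]
    set p := (lp.getD k (1, -1)).2 with hp
    have hpk : p < (k : Int) := hinv k hk
    by_cases hneg : p < 0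
    · rw [pvChain_neg _ _ _ _ _ hneg, pvChain_neg _ _ _ _ _ hneg]
    · have hj : p = ((p.toNat : Nat) : Int) := by omega
      rw [hj]
      have hjk : p.toNat < k := by omega
      rw [ih p.toNat hjk (by omega) f _ (by omega),
          ih p.toNat hjk (by omega) k _ (by omega)]

theorem pvChain_append (X : List Int) (lp : List (Nat × Int)) (e : Nat × Int)
    (hinv : pvParInv lp) :
    ∀ (f : Nat) (k : Int) (acc : List Int), k < (lp.length : Int) →
      pvChain X (lp ++ [e]) f k acc = pvChain X lp f k acc := by
  intro f
  induction f with
  | zero => intro k acc _; rfl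
  | succ f ih =>
    intro k acc hk
    by_cases h0 : 0 ≤ k
    · have hkn : k.toNat < lp.length := by omega
      simp only [pvChain, if_pos h0, List.getD_append _ _ _ _ hkn]
      exact ih _ _ (lt_of_lt_of_le (hinv k.toNat hkn) (by omega))
    · simp only [pvChain, if_neg h0]

-- main invariant relating A's dp lists to B's (len, par) arrays
def pvInvN (X : List Int) (n : Nat) : Prop :=
  ∀ j, j < n →
    -1 ≤ ((pvLpN X n).getD j (1, -1)).2 ∧
    ((pvLpN X n).getD j (1, -1)).2 < (j : Int) ∧
    ((pvDpN X n).getD j []).length = ((pvLpN X n).getD j (1, -1)).1 ∧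
    (pvDpN X n).getD j [] = pvChain X (pvLpN X n) (j+1) (j : Int) []

theorem pvInvN_parInv (X : List Int) (n : Nat) (h : pvInvN X n) : pvParInv (pvLpN X n) := by
  intro idx hidx
  rw [pvLpN_len] at hidx
  exact (h idx hidx).2.1

-- abbreviations for the two inner-row fold steps (proof-side only)
def pvStepA (X : List Int) (dp : List (List Int)) (n : Nat) (cur : List Int) (j : Nat) : List Int :=
  if X.getD j 0 < X.getD n 0 ∧ (dp.getD j []).length + 1 > cur.length
  then dp.getD j [] ++ [X.getD n 0] else cur

def pvStepB (X : List Int) (lp : List (Nat × Int)) (n : Nat) (cur : Nat × Int) (j : Nat) : Nat × Int :=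
  if X.getD j 0 < X.getD n 0 ∧ (lp.getD j (1, -1)).1 + 1 > cur.1
  then ((lp.getD j (1, -1)).1 + 1, (j : Int)) else cur

theorem pvDpRow_eq (X : List Int) (dp : List (List Int)) (i : Nat) :
    pvDpRow X dp i = (List.range i).foldl (pvStepA X dp i) [X.getD i 0] := rfl

theorem pvLpRow_eq (X : List Int) (lp : List (Nat × Int)) (i : Nat) :
    pvLpRow X lp i = (List.range i).foldl (pvStepB X lp i) (1, -1) := rfl

-- reconstruction of a (len, par) row state as A's list-valued row state
def pvRec (X : List Int) (lp : List (Nat × Int)) (n : Nat) (cp : Nat × Int) : List Int :=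
  (if cp.2 < 0 then [] else pvChain X lp (cp.2.toNat + 1) cp.2 []) ++ [X.getD n 0]

-- the inner-row folds run in lockstep
theorem pvRow_corr (X : List Int) (n : Nat) (hn : pvInvN X n) :
    ∀ (l : List Nat), (∀ j ∈ l, j < n) →
    ∀ (cl : List Int) (cp : Nat × Int),
      cl.length = cp.1 → -1 ≤ cp.2 → cp.2 < (n : Int) →
      cl = pvRec X (pvLpN X n) n cp →
      (l.foldl (pvStepA X (pvDpN X n) n) cl = pvRec X (pvLpN X n) n (l.foldl (pvStepB X (pvLpN X n) n) cp) ∧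
       (l.foldl (pvStepA X (pvDpN X n) n) cl).length = (l.foldl (pvStepB X (pvLpN X n) n) cp).1 ∧
       -1 ≤ (l.foldl (pvStepB X (pvLpN X n) n) cp).2 ∧
       (l.foldl (pvStepB X (pvLpN X n) n) cp).2 < (n : Int)) := by
  intro l
  induction l with
  | nil => intro _ cl cp h1 h2 h3 h4; exact ⟨h4, h1, h2, h3⟩
  | cons j l ih =>
    intro hmem cl cp h1 h2 h3 h4
    have hj : j < n := hmem j (List.mem_cons_self)
    obtain ⟨hp1, hp2, hlen, hchain⟩ := hn j hj
    simp only [List.foldl_cons]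
    by_cases hc : X.getD j 0 < X.getD n 0 ∧ ((pvLpN X n).getD j (1, -1)).1 + 1 > cp.1
    · have hcA : X.getD j 0 < X.getD n 0 ∧ ((pvDpN X n).getD j []).length + 1 > cl.length := by
        rw [hlen, h1]; exact hc
      rw [show pvStepA X (pvDpN X n) n cl j = (pvDpN X n).getD j [] ++ [X.getD n 0] from if_pos hcA,
          show pvStepB X (pvLpN X n) n cp j = (((pvLpN X n).getD j (1, -1)).1 + 1, (j : Int)) from if_pos hc]
      apply ih (fun a ha => hmem a (List.mem_cons_of_mem _ ha))
      · simp only [List.length_append, List.length_cons, List.length_nil]; omega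
      · show (-1 : Int) ≤ (j : Int); omega
      · show ((j : Nat) : Int) < (n : Int); omega
      · simp only [pvRec, Int.toNat_natCast]
        rw [if_neg (show ¬ ((j : Int) < 0) by omega), ← hchain]
    · have hcA : ¬ (X.getD j 0 < X.getD n 0 ∧ ((pvDpN X n).getD j []).length + 1 > cl.length) := by
        rw [hlen, h1]; exact hc
      rw [show pvStepA X (pvDpN X n) n cl j = cl from if_neg hcA,
          show pvStepB X (pvLpN X n) n cp j = cp from if_neg hc]
      exact ih (fun a ha => hmem a (List.mem_cons_of_mem _ ha)) cl cp h1 h2 h3 h4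

-- getD at the freshly appended slot
theorem pvGetD_concat {α : Type} (l : List α) (a d : α) (k : Nat) (hk : k = l.length) :
    (l ++ [a]).getD k d = a := by subst hk; simp [List.getD]

theorem pvInvN_all (X : List Int) : ∀ n, n ≤ X.length → pvInvN X n := by
  intro n
  induction n with
  | zero => intro _ j hj; omega
  | succ n ih =>
    intro hle
    have hI := ih (by omega)
    have hpar := pvInvN_parInv X n hI
    have hlplen := pvLpN_len X n
    have hdplen := pvDpN_len X n
    intro j hj
    rcases Nat.lt_succ_iff_lt_or_eq.mp hj with hj | hj
    · -- old entries: reduce level n+1 to level n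
      obtain ⟨hp1, hp2, hlen, hchain⟩ := hI j hj
      rw [pvLpN_succ, pvDpN_succ,
          List.getD_append _ _ _ _ (by omega),
          List.getD_append _ _ _ _ (by omega)]
      refine ⟨hp1, hp2, hlen, ?_⟩
      rw [pvChain_append X (pvLpN X n) _ hpar _ _ _ (by omega)]
      exact hchain
    · -- the new entry j = n
      subst hj
      have hrow := pvRow_corr X j hI (List.range j) (fun a ha => List.mem_range.mp ha)
        [X.getD j 0] (1, -1) (by simp) (by omega) (by omega)
        (by simp [pvRec])
      obtain ⟨hrec, hlen, hlo, hhi⟩ := hrow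
      rw [pvLpN_succ, pvDpN_succ,
          pvGetD_concat _ _ _ _ (by omega), pvGetD_concat _ _ _ _ (by omega),
          pvLpRow_eq, pvDpRow_eq]
      set cp := (List.range j).foldl (pvStepB X (pvLpN X j) j) (1, -1) with hcp
      refine ⟨hlo, hhi, hlen, ?_⟩
      -- unfold one step of the chain at index j with fuel j+1
      have hstep : pvChain X (pvLpN X j ++ [(List.range j).foldl (pvStepB X (pvLpN X j) j) (1, -1)]) (j + 1) (j : Int) []
          = pvChain X (pvLpN X j ++ [cp]) j cp.2 [X.getD j 0] := by
        simp only [pvChain, if_pos (show (0:Int) ≤ (j:Int) by omega), Int.toNat_natCast]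
        rw [pvGetD_concat _ _ _ _ (by omega)]
      rw [hstep]
      by_cases hneg : cp.2 < 0
      · rw [pvChain_neg _ _ _ _ _ hneg, hrec]
        simp [pvRec, hneg]
      · have h0 : (0 : Int) ≤ cp.2 := by omega
        have hcast : cp.2 = ((cp.2.toNat : Nat) : Int) := by omega
        have hlt : cp.2.toNat < j := by omega
        rw [pvChain_append X (pvLpN X j) _ hpar _ _ _ (by omega),
            pvChain_acc, hcast,
            pvChain_fuel X (pvLpN X j) hpar cp.2.toNat (by omega) j _ (by omega),
            hrec]
        simp [pvRec, hneg, ← hcast]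

-- the two combine-phase fold steps
def pvCStepA (X Y : List Int) (i : Nat) (best : List Int) (j : Nat) : List Int :=
  let b1 := if X.getD i 0 < Y.getD j 0 ∧ (X.getD i 0 :: (pvDpN Y Y.length).getD j []).length > best.length
            then X.getD i 0 :: (pvDpN Y Y.length).getD j [] else best
  if Y.getD j 0 < X.getD i 0 ∧ (Y.getD j 0 :: (pvDpN X X.length).getD i []).length > b1.length
  then Y.getD j 0 :: (pvDpN X X.length).getD i [] else b1

def pvCStepB (X Y : List Int) (i : Nat) (best : Nat × Option (Bool × Nat × Nat)) (j : Nat) :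
    Nat × Option (Bool × Nat × Nat) :=
  let b1 := if X.getD i 0 < Y.getD j 0 ∧ 1 + ((pvLpN Y Y.length).getD j (1, -1)).1 > best.1
            then (1 + ((pvLpN Y Y.length).getD j (1, -1)).1, some (true, i, j)) else best
  if Y.getD j 0 < X.getD i 0 ∧ 1 + ((pvLpN X X.length).getD i (1, -1)).1 > b1.1
  then (1 + ((pvLpN X X.length).getD i (1, -1)).1, some (false, i, j)) else b1

-- correspondence between the list-valued best and B's (length, endpoints) best
def pvQ (X Y : List Int) (bl : List Int) (bp : Nat × Option (Bool × Nat × Nat)) : Prop :=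
  bl.length = bp.1 ∧
  match bp.2 with
  | none => bl = []
  | some (s, i, j) => i < X.length ∧ j < Y.length ∧
      bl = if s then X.getD i 0 :: (pvDpN Y Y.length).getD j []
           else Y.getD j 0 :: (pvDpN X X.length).getD i []

theorem pvCStep_corr (X Y : List Int) (i j : Nat) (hi : i < X.length) (hj : j < Y.length)
    (bl : List Int) (bp : Nat × Option (Bool × Nat × Nat)) (hQ : pvQ X Y bl bp) :
    pvQ X Y (pvCStepA X Y i bl j) (pvCStepB X Y i bp j) := by
  have hlenY := (pvInvN_all Y Y.length le_rfl j hj).2.2.1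
  have hlenX := (pvInvN_all X X.length le_rfl i hi).2.2.1
  have hq1 : bl.length = bp.1 := hQ.1
  simp only [pvCStepA, pvCStepB]
  by_cases hc1 : X.getD i 0 < Y.getD j 0 ∧ 1 + ((pvLpN Y Y.length).getD j (1, -1)).1 > bp.1
  · have hc1A : X.getD i 0 < Y.getD j 0 ∧ (X.getD i 0 :: (pvDpN Y Y.length).getD j []).length > bl.length := by
      refine ⟨hc1.1, ?_⟩; have := hc1.2; simp only [List.length_cons]; omega
    rw [if_pos hc1A, if_pos hc1]
    by_cases hc2 : Y.getD j 0 < X.getD i 0 ∧ 1 + ((pvLpN X X.length).getD i (1, -1)).1 > 1 + ((pvLpN Y Y.length).getD j (1, -1)).1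
    · have hc2A : Y.getD j 0 < X.getD i 0 ∧ (Y.getD j 0 :: (pvDpN X X.length).getD i []).length > (X.getD i 0 :: (pvDpN Y Y.length).getD j []).length := by
        refine ⟨hc2.1, ?_⟩; have := hc2.2; simp only [List.length_cons]; omega
      rw [if_pos hc2A, if_pos hc2]
      exact ⟨by simp only [List.length_cons]; omega, hi, hj, by simp⟩
    · have hc2A : ¬ (Y.getD j 0 < X.getD i 0 ∧ (Y.getD j 0 :: (pvDpN X X.length).getD i []).length > (X.getD i 0 :: (pvDpN Y Y.length).getD j []).length) := by
        intro h; exact hc2 ⟨h.1, by have := h.2; simp only [List.length_cons] at this; omega⟩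
      rw [if_neg hc2A, if_neg hc2]
      exact ⟨by simp only [List.length_cons]; omega, hi, hj, by simp⟩
  · have hc1A : ¬ (X.getD i 0 < Y.getD j 0 ∧ (X.getD i 0 :: (pvDpN Y Y.length).getD j []).length > bl.length) := by
      intro h; exact hc1 ⟨h.1, by have := h.2; simp only [List.length_cons] at this; omega⟩
    rw [if_neg hc1A, if_neg hc1]
    by_cases hc2 : Y.getD j 0 < X.getD i 0 ∧ 1 + ((pvLpN X X.length).getD i (1, -1)).1 > bp.1
    · have hc2A : Y.getD j 0 < X.getD i 0 ∧ (Y.getD j 0 :: (pvDpN X X.length).getD i []).length > bl.length := by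
        refine ⟨hc2.1, ?_⟩; have := hc2.2; simp only [List.length_cons]; omega
      rw [if_pos hc2A, if_pos hc2]
      exact ⟨by simp only [List.length_cons]; omega, hi, hj, by simp⟩
    · have hc2A : ¬ (Y.getD j 0 < X.getD i 0 ∧ (Y.getD j 0 :: (pvDpN X X.length).getD i []).length > bl.length) := by
        intro h; exact hc2 ⟨h.1, by have := h.2; simp only [List.length_cons] at this; omega⟩
      rw [if_neg hc2A, if_neg hc2]
      exact hQ

theorem pvInner_corr (X Y : List Int) (i : Nat) (hi : i < X.length) :
    ∀ (l : List Nat), (∀ j ∈ l, j < Y.length) →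
    ∀ (bl : List Int) (bp : Nat × Option (Bool × Nat × Nat)), pvQ X Y bl bp →
      pvQ X Y (l.foldl (pvCStepA X Y i) bl) (l.foldl (pvCStepB X Y i) bp) := by
  intro l
  induction l with
  | nil => intro _ bl bp h; exact h
  | cons j l ih =>
    intro hmem bl bp h
    simp only [List.foldl_cons]
    exact ih (fun a ha => hmem a (List.mem_cons_of_mem _ ha))
      _ _ (pvCStep_corr X Y i j hi (hmem j List.mem_cons_self) bl bp h)

theorem pvOuter_corr (X Y : List Int) :
    ∀ (l : List Nat), (∀ i ∈ l, i < X.length) →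
    ∀ (bl : List Int) (bp : Nat × Option (Bool × Nat × Nat)), pvQ X Y bl bp →
      pvQ X Y (l.foldl (fun best i => (List.range Y.length).foldl (pvCStepA X Y i) best) bl)
              (l.foldl (fun best i => (List.range Y.length).foldl (pvCStepB X Y i) best) bp) := by
  intro l
  induction l with
  | nil => intro _ bl bp h; exact h
  | cons i l ih =>
    intro hmem bl bp h
    simp only [List.foldl_cons]
    exact ih (fun a ha => hmem a (List.mem_cons_of_mem _ ha)) _ _
      (pvInner_corr X Y i (hmem i List.mem_cons_self) (List.range Y.length)
        (fun a ha => List.mem_range.mp ha) bl bp h)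

theorem pvBuildA_eq (X Y : List Int) :
    pvBuildA X Y = (List.range X.length).foldl
      (fun best i => (List.range Y.length).foldl (pvCStepA X Y i) best) [] := rfl

theorem pvBuildB_eq (X Y : List Int) :
    pvBuildB X Y =
      (match ((List.range X.length).foldl
        (fun best i => (List.range Y.length).foldl (pvCStepB X Y i) best) (0, none)).2 with
      | none => []
      | some (s, i, j) =>
          if s then X.getD i 0 :: pvChain Y (pvLpN Y Y.length) Y.length (j : Int) []
          else Y.getD j 0 :: pvChain X (pvLpN X X.length) X.length (i : Int) []) := rfl

theorem pvBuild_corr (X Y : List Int) : pvBuildA X Y = pvBuildB X Y := by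
  have hQ := pvOuter_corr X Y (List.range X.length) (fun a ha => List.mem_range.mp ha)
    [] (0, none) ⟨rfl, rfl⟩
  rw [pvBuildA_eq, pvBuildB_eq]
  set bp := (List.range X.length).foldl
      (fun best i => (List.range Y.length).foldl (pvCStepB X Y i) best) (0, none) with hbp
  obtain ⟨hlen, hmatch⟩ := hQ
  match h2 : bp.2 with
  | none => simpa [h2] using hmatch
  | some (s, i, j) =>
    rw [h2] at hmatch
    obtain ⟨hi, hj, hbl⟩ := hmatch
    have hchainY : (pvDpN Y Y.length).getD j [] = pvChain Y (pvLpN Y Y.length) Y.length (j : Int) [] := by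
      have h := (pvInvN_all Y Y.length le_rfl j hj).2.2.2
      rw [h, pvChain_fuel Y (pvLpN Y Y.length) (pvInvN_parInv Y Y.length (pvInvN_all Y Y.length le_rfl))
            j (by rw [pvLpN_len]; exact hj) Y.length _ (by omega)]
    have hchainX : (pvDpN X X.length).getD i [] = pvChain X (pvLpN X X.length) X.length (i : Int) [] := by
      have h := (pvInvN_all X X.length le_rfl i hi).2.2.2
      rw [h, pvChain_fuel X (pvLpN X X.length) (pvInvN_parInv X X.length (pvInvN_all X X.length le_rfl))
            i (by rw [pvLpN_len]; exact hi) X.length _ (by omega)]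
    rw [hbl]
    cases s
    · simp only [List.getD] at hchainX
      simp [hchainX]
    · simp only [List.getD] at hchainY
      simp [hchainY]

-- ===== VERDICT (by name: the statement is the Claim_ definition above) =====
theorem longest_alternating_increasing_spec : Claim_equal_longest_alternating_increasing := by
  intro A B _
  unfold Spec_longest_alternating_increasing longest_alternating_increasing longest_alternating_increasing_alt
  rw [pvBuild_corr A B, pvBuild_corr B A]
  set r1 := pvBuildB A B
  set r2 := pvBuildB B A
  by_cases h : r1.length ≥ r2.length
  · simp [h, Nat.not_lt.mpr h]
  · simp only [if_neg h]
    have : r2.length > r1.length := by omega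
    simp [this]
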